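-- pv_equiv track=rewrite | github.com/sugap91/vanity-number-generator | lambda-function/contacts/vanity_number.py | find_all_substrings
-- ===== SOURCE A (Python) =====
-- def find_all_substrings(word):
--     """Returns substrings present in a given string
--
--     Args:
--         word (str): string of chars
--
--     Returns:
--         all_substrings (list): all substrings in a word
--
--     """
--
--     all_substrings = []
--     substring = ""
--     len_word = len(word)
--     for index, char in enumerate(word):
--         if char.isalpha():
--             substring += char
--             if index == len_word - 1 or not word[index + 1].isdigit():
--                 all_substrings.append(substring)
--         else:
--             substring = ""
--     return all_substrings
-- ===== SOURCE B (Python) =====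
-- def find_all_substrings(word):
--     """Returns substrings present in a given string (run-splitting version).
--
--     Splits the word into maximal alphabetic runs; for each run emits its
--     prefixes in order, dropping the full run when it is followed by a digit.
--     """
--     result = []
--     i = 0
--     n = len(word)
--     while i < n:
--         if not word[i].isalpha():
--             i += 1
--             continue
--         j = i
--         while j < n and word[j].isalpha():
--             j += 1
--         run = word[i:j]
--         last = len(run)
--         if j < n and word[j].isdigit():
--             last -= 1
--         for k in range(1, last + 1):
--             result.append(run[:k])
--         i = j
--     return result
-- ===== Notes on version B (the rewrite author's own statement) =====
-- stated objective: alternative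
-- what changed: Replaces A's per-character loop with a running substring accumulator by a run-splitter that extracts each maximal alphabetic run and emits all its prefixes at once, dropping the full run when it is followed by a digit.
import Mathlib
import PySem

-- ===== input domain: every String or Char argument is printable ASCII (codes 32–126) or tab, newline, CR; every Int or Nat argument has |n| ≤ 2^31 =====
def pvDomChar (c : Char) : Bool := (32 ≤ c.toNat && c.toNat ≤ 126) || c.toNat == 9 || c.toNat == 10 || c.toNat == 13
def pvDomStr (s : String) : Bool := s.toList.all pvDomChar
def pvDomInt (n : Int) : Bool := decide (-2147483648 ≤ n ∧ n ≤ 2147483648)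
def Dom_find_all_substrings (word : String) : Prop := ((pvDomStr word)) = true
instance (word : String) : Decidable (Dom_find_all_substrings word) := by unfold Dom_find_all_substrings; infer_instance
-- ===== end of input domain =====

-- B replaces A's per-character accumulator loop by a run-splitter that emits each
-- alphabetic run's prefixes at once (objective: alternative decomposition, same cost).

-- ===== PORT A =====
-- A's for-loop over (index, char) as structural recursion over the remaining chars:
-- the state is (accumulated output, current substring); 'index == len_word - 1' is
-- 'rest = []' and 'word[index + 1]' is the head of 'rest' (the same values A reads).
def pvGoA : List Char → List String → List Char → List String
  | [], acc, _ => acc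
  | c :: rest, acc, sub =>
    if PySem.Chars.isalpha c then
      let sub' := sub ++ [c]
      if (match rest with
          | [] => true
          | c2 :: _ => !PySem.Chars.isdigit c2) then
        pvGoA rest (acc ++ [String.mk sub']) sub'
      else
        pvGoA rest acc sub'
    else
      pvGoA rest acc []

def find_all_substrings (word : String) : List String :=
  pvGoA word.toList [] []

-- ===== PORT B =====
-- B's 'last = len(run); if j < n and word[j].isdigit(): last -= 1'
def pvLast (run rest' : List Char) : Nat :=
  match rest' with
  | [] => run.length
  | d :: _ => if PySem.Chars.isdigit d then run.length - 1 else run.length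

-- B's outer while-loop: skip a non-alpha char, or take the maximal alpha run,
-- emit its prefixes run[:1] … run[:last], and continue after the run.
def pvGoB : List Char → List String
  | [] => []
  | c :: rest =>
    if ha : PySem.Chars.isalpha c then
      let run := List.takeWhile PySem.Chars.isalpha (c :: rest)
      let rest' := List.dropWhile PySem.Chars.isalpha (c :: rest)
      ((List.range (pvLast run rest')).map (fun k => String.mk (run.take (k + 1)))) ++ pvGoB rest'
    else
      pvGoB rest
  termination_by cs => cs.length
  decreasing_by
  · simp only [List.dropWhile, ha]
    exact Nat.lt_succ_of_le (List.length_dropWhile_le _ _)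
  · simp

def find_all_substrings_alt (word : String) : List String :=
  pvGoB word.toList

-- ===== PRECONDITION & SPEC =====
def Spec_find_all_substrings (word : String) (out : List String) : Prop := out = find_all_substrings_alt word
instance (word : String) (out : List String) : Decidable (Spec_find_all_substrings word out) := by unfold Spec_find_all_substrings; infer_instance

-- ===== CLAIM (what is proved, stated in full; the proofs are below) =====
def Claim_equal_find_all_substrings : Prop := ∀ (word : String), Dom_find_all_substrings word → Spec_find_all_substrings word (find_all_substrings word)

-- ===== LEMMAS AND PROOFS =====

lemma pv_alpha_not_digit (c : Char) (h : PySem.Chars.isalpha c = true) :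
    PySem.Chars.isdigit c = false := by
  unfold PySem.Chars.isalpha PySem.Chars.isupper PySem.Chars.islower at h
  unfold PySem.Chars.isdigit
  simp [Char.le_def, UInt32.le_iff_toNat_le] at *
  omega

-- A's walk through one maximal alpha run emits exactly the run's prefixes
-- (extended with the pending substring), dropping the full run before a digit.
lemma pvGoA_run (run : List Char) (hne : run ≠ [])
    (hall : ∀ c ∈ run, PySem.Chars.isalpha c = true) :
    ∀ (rest : List Char) (sub : List Char) (acc : List String),
      pvGoA (run ++ rest) acc sub =
        pvGoA rest
          (acc ++ (List.range (pvLast run rest)).map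
            (fun k => String.mk (sub ++ run.take (k + 1))))
          (sub ++ run) := by
  induction run with
  | nil => exact absurd rfl hne
  | cons c t ih =>
    intro rest sub acc
    have hc : PySem.Chars.isalpha c = true := hall c (by simp)
    cases t with
    | nil =>
      cases rest with
      | nil => simp [pvGoA, pvLast, hc]
      | cons d r =>
        by_cases hd : PySem.Chars.isdigit d = true
        · simp [pvGoA, pvLast, hc, hd]
        · simp at hd
          simp [pvGoA, pvLast, hc, hd, List.range_succ]
    | cons c2 t' =>
      have hc2 : PySem.Chars.isalpha c2 = true := hall c2 (by simp)
      have hnd : PySem.Chars.isdigit c2 = false := pv_alpha_not_digit c2 hc2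
      have step : pvGoA ((c :: c2 :: t') ++ rest) acc sub =
          pvGoA ((c2 :: t') ++ rest) (acc ++ [String.mk (sub ++ [c])]) (sub ++ [c]) := by
        simp [pvGoA, hc, hnd]
      rw [step, ih (by simp) (fun x hx => hall x (by simp [hx])) rest (sub ++ [c])]
      have h1 : pvLast (c :: c2 :: t') rest = pvLast (c2 :: t') rest + 1 := by
        cases rest with
        | nil => simp [pvLast]
        | cons d r => by_cases hd : PySem.Chars.isdigit d = true <;> simp [pvLast, hd]
      rw [h1, List.range_succ_eq_map]
      simp [List.map_map, Function.comp_def, List.take_succ_cons, List.append_assoc]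

-- head of dropWhile fails the predicate
lemma pv_dropWhile_head (cs : List Char) :
    ∀ d r, List.dropWhile PySem.Chars.isalpha cs = d :: r → PySem.Chars.isalpha d = false := by
  intro d r h
  have := List.head?_dropWhile_not PySem.Chars.isalpha cs
  simp [h] at this
  simpa using this

lemma pvGoA_eq_pvGoB (cs : List Char) : ∀ acc, pvGoA cs acc [] = acc ++ pvGoB cs := by
  induction hn : cs.length using Nat.strong_induction_on generalizing cs with
  | _ n ih =>
    intro acc
    match cs, hn with
    | [], _ => simp [pvGoA, pvGoB]
    | c :: rest, hn =>
      simp only [List.length_cons] at hn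
      by_cases hc : PySem.Chars.isalpha c = true
      · -- the maximal alpha run starting at c
        have hsplit := List.takeWhile_append_dropWhile (p := PySem.Chars.isalpha) (l := c :: rest)
        have hne : List.takeWhile PySem.Chars.isalpha (c :: rest) ≠ [] := by
          simp [List.takeWhile, hc]
        have hall : ∀ x ∈ List.takeWhile PySem.Chars.isalpha (c :: rest),
            PySem.Chars.isalpha x = true := fun x hx => List.mem_takeWhile_imp hx
        have hA : pvGoA (c :: rest) acc [] =
            pvGoA (List.dropWhile PySem.Chars.isalpha (c :: rest))
              (acc ++ (List.range (pvLast (List.takeWhile PySem.Chars.isalpha (c :: rest))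
                                          (List.dropWhile PySem.Chars.isalpha (c :: rest)))).map
                (fun k => String.mk ((List.takeWhile PySem.Chars.isalpha (c :: rest)).take (k + 1))))
              (List.takeWhile PySem.Chars.isalpha (c :: rest)) := by
          conv_lhs => rw [← hsplit]
          simpa using pvGoA_run _ hne hall (List.dropWhile PySem.Chars.isalpha (c :: rest)) [] acc
        have hB : pvGoB (c :: rest) =
            (List.range (pvLast (List.takeWhile PySem.Chars.isalpha (c :: rest))
                                (List.dropWhile PySem.Chars.isalpha (c :: rest)))).map
              (fun k => String.mk ((List.takeWhile PySem.Chars.isalpha (c :: rest)).take (k + 1)))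
              ++ pvGoB (List.dropWhile PySem.Chars.isalpha (c :: rest)) := by
          rw [pvGoB]; simp [hc]
        rw [hA, hB]
        cases hr : List.dropWhile PySem.Chars.isalpha (c :: rest) with
        | nil => simp [pvGoA, pvGoB]
        | cons d r =>
          have hd : PySem.Chars.isalpha d = false := pv_dropWhile_head (c :: rest) d r hr
          have hlen : r.length < n := by
            have h1 : (List.dropWhile PySem.Chars.isalpha (c :: rest)).length ≤ rest.length := by
              simp only [List.dropWhile, hc]
              exact List.length_dropWhile_le _ _
            rw [hr] at h1
            simp at h1
            omega
          simp only [pvGoA, hd, Bool.false_eq_true, if_false]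
          rw [ih r.length hlen r rfl]
          simp [pvGoB, hd, List.append_assoc]
      · -- non-alpha head: both skip it
        simp only [Bool.not_eq_true] at hc
        have hlen : rest.length < n := by omega
        simp only [pvGoA, hc, Bool.false_eq_true, if_false]
        rw [ih rest.length hlen rest rfl]
        simp [pvGoB, hc]

-- ===== VERDICT (by name: the statement is the Claim_ definition above) =====
theorem find_all_substrings_spec : Claim_equal_find_all_substrings := by
  intro word _
  unfold Spec_find_all_substrings find_all_substrings find_all_substrings_alt
  simpa using pvGoA_eq_pvGoB word.toList []
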